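-- pv_equiv track=rewrite | github.com/sebinsua/2023-interview-prep | neetcode/1d-dynamic-programming/0647-palindromic-substring.py | count_odd_palindromes
-- ===== SOURCE A (Python) =====
-- def count_odd_palindromes(s: str, index: int) -> int:
--     L = len(s)
--     left = index - 1
--     right = index + 1
--
--     count = 0
--     count += 1
--
--     while 0 <= left < index and index <= right < L and s[left] == s[right]:
--         count += 1
--
--         left -= 1
--         right += 1
--
--     return count
-- ===== SOURCE B (Python) =====
-- def count_odd_palindromes(s: str, index: int) -> int:
--     L = len(s)
--     r = min(index, L - index - 1)
--     if r < 0: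
--         r = 0
--     lo, hi = 0, r
--     while lo < hi:
--         mid = (lo + hi + 1) // 2
--         sub = s[index - mid:index + mid + 1]
--         if sub == sub[::-1]:
--             lo = mid
--         else:
--             hi = mid - 1
--     return 1 + lo
-- ===== Notes on version B (the rewrite author's own statement) =====
-- stated objective: alternative
-- what changed: Replaces A's linear center-expansion loop by a binary search on the palindromic radius (valid because 's[i-k:i+k+1] is a palindrome' is downward-monotone in k), testing each candidate radius with a whole-substring slice-vs-reversed-slice comparison instead of per-character pointer stepping.
import Mathlib
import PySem

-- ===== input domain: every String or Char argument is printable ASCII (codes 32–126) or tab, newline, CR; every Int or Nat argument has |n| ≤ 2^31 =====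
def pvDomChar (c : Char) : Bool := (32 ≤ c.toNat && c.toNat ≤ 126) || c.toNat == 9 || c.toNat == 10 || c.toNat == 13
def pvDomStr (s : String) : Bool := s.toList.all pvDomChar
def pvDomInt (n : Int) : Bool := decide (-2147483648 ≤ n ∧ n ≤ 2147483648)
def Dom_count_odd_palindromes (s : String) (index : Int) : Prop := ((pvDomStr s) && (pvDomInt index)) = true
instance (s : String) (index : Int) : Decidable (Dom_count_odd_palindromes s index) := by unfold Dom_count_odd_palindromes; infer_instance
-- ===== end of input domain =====

-- B replaces A's linear center-expansion loop by a binary search on the palindromic radius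
-- (the predicate "s[i-k:i+k+1] is a palindrome" is downward-monotone in k), testing each
-- candidate radius by comparing the whole substring with its reversal; alternative algorithm, not claimed faster.

-- ===== PORT A =====
-- the while loop of A: state (left, right, count); terminates because right grows to L
def countA_loop (s : String) (L index : Int) (left right count : Int) : Int :=
  if h : 0 ≤ left ∧ left < index ∧ index ≤ right ∧ right < L ∧
         PySem.Str.pyGet? s left = PySem.Str.pyGet? s right then
    countA_loop s L index (left - 1) (right + 1) (count + 1)
  else
    count
termination_by (L - right).toNat
decreasing_by omega

def count_odd_palindromes (s : String) (index : Int) : Int :=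
  let L : Int := PySem.Str.len s
  let left := index - 1
  let right := index + 1
  let count : Int := 0
  let count := count + 1
  countA_loop s L index left right count

-- ===== PORT B =====
-- 'sub == sub[::-1]' for sub = s[index-mid : index+mid+1]
def palB (s : String) (index mid : Int) : Bool :=
  let sub := PySem.Str.slice s (some (index - mid)) (some (index + mid + 1))
  some sub == PySem.Str.slice? sub none none (-1)

-- B's while loop: binary search for the largest radius whose substring is a palindrome
def bsLoop (s : String) (index lo hi : Int) : Int :=
  if _h : lo < hi then
    if palB s index (PySem.Int.floordiv (lo + hi + 1) 2) then
      bsLoop s index (PySem.Int.floordiv (lo + hi + 1) 2) hi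
    else
      bsLoop s index lo (PySem.Int.floordiv (lo + hi + 1) 2 - 1)
  else lo
termination_by (hi - lo).toNat
decreasing_by
  all_goals rw [PySem.Int.floordiv_eq_ediv_of_pos (by omega : (0:Int) < 2)] at *
  all_goals omega

def count_odd_palindromes_alt (s : String) (index : Int) : Int :=
  let L : Int := PySem.Str.len s
  let r := min index (L - index - 1)
  let r := if r < 0 then 0 else r
  1 + bsLoop s index 0 r

-- ===== PRECONDITION & SPEC =====
def Spec_count_odd_palindromes (s : String) (index : Int) (out : Int) : Prop := out = count_odd_palindromes_alt s index
instance (s : String) (index : Int) (out : Int) : Decidable (Spec_count_odd_palindromes s index out) := by unfold Spec_count_odd_palindromes; infer_instance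

-- ===== CLAIM (what is proved, stated in full; the proofs are below) =====
def Claim_equal_count_odd_palindromes : Prop := ∀ (s : String) (index : Int), Dom_count_odd_palindromes s index → Spec_count_odd_palindromes s index (count_odd_palindromes s index)

-- ===== LEMMAS AND PROOFS =====

-- proof-side measure: length of the run of matching pairs around center i, from radius k+1 on, budget b
def run (cs : List Char) (i : Nat) : Nat → Nat → Nat
  | _, 0 => 0
  | k, b + 1 =>
    if cs.getD (i - 1 - k) ' ' = cs.getD (i + 1 + k) ' ' then run cs i (k + 1) b + 1 else 0

theorem run_le (cs : List Char) (i : Nat) : ∀ b k, run cs i k b ≤ b := by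
  intro b
  induction b with
  | zero => intro k; simp [run]
  | succ b ih => intro k; simp only [run]; split_ifs <;> [exact Nat.succ_le_succ (ih (k+1)); omega]

theorem run_iff (cs : List Char) (i : Nat) :
    ∀ b k d, d ≤ b →
      ((∀ j, j < d → cs.getD (i - 1 - (k + j)) ' ' = cs.getD (i + 1 + (k + j)) ' ') ↔
        d ≤ run cs i k b) := by
  intro b
  induction b with
  | zero => intro k d hd; interval_cases d; simp
  | succ b ih =>
    intro k d hd
    cases d with
    | zero => simp
    | succ e =>
      simp only [run]
      by_cases hc : cs.getD (i - 1 - k) ' ' = cs.getD (i + 1 + k) ' '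
      · rw [if_pos hc]
        constructor
        · intro h
          have := (ih (k + 1) e (by omega)).mp (by
            intro j hj
            have := h (j + 1) (by omega)
            have e1 : k + (j + 1) = k + 1 + j := by omega
            rwa [e1] at this)
          omega
        · intro h j hj
          cases j with
          | zero => simpa using hc
          | succ j =>
            have := (ih (k + 1) e (by omega)).mpr (by omega) j (by omega)
            have e1 : k + 1 + j = k + (j + 1) := by omega
            rwa [e1] at this
      · rw [if_neg hc]
        constructor
        · intro h
          exact absurd (by simpa using h 0 (by omega)) hc
        · omega

-- A-side: the loop from radius k equals count + run of the remaining pairs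
theorem loopA_eq_run (s : String) (i k : Nat) (d : Nat) (c : Int)
    (hrn : k + d = min i (s.toList.length - 1 - i)) (hi : i < s.toList.length) :
    countA_loop s ((s.toList.length : Nat) : Int) (i : Int) ((i : Int) - 1 - k) ((i : Int) + 1 + k) c
      = c + run s.toList i k d := by
  induction d generalizing k c with
  | zero =>
    rw [countA_loop]
    have hno : ¬ (0 ≤ (i : Int) - 1 - k ∧ (i : Int) - 1 - k < i ∧ (i : Int) ≤ (i : Int) + 1 + k ∧
        (i : Int) + 1 + k < ((s.toList.length : Nat) : Int) ∧
        PySem.Str.pyGet? s ((i : Int) - 1 - k) = PySem.Str.pyGet? s ((i : Int) + 1 + k)) := by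
      intro ⟨h1, _, _, h4, _⟩
      omega
    rw [dif_neg hno]
    simp [run]
  | succ d ih =>
    have hk1 : k < i := by omega
    have hk2 : i + 1 + k < s.toList.length := by omega
    rw [countA_loop]
    have e1 : (i : Int) - 1 - k = ((i - 1 - k : Nat) : Int) := by omega
    have e2 : (i : Int) + 1 + k = ((i + 1 + k : Nat) : Int) := by omega
    have g1 : PySem.Str.pyGet? s ((i : Int) - 1 - k) = some (s.toList[i - 1 - k]'(by omega)) := by
      rw [e1, PySem.Str.pyGet?_natCast, List.getElem?_eq_getElem (by omega)]
    have g2 : PySem.Str.pyGet? s ((i : Int) + 1 + k) = some (s.toList[i + 1 + k]'(by omega)) := by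
      rw [e2, PySem.Str.pyGet?_natCast, List.getElem?_eq_getElem (by omega)]
    by_cases hc : s.toList[i - 1 - k]'(by omega) = s.toList[i + 1 + k]'(by omega)
    · have cond : 0 ≤ (i : Int) - 1 - k ∧ (i : Int) - 1 - k < i ∧ (i : Int) ≤ (i : Int) + 1 + k ∧
          (i : Int) + 1 + k < ((s.toList.length : Nat) : Int) ∧
          PySem.Str.pyGet? s ((i : Int) - 1 - k) = PySem.Str.pyGet? s ((i : Int) + 1 + k) :=
        ⟨by omega, by omega, by omega, by omega, by rw [g1, g2, hc]⟩
      rw [dif_pos cond]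
      have e3 : (i : Int) - 1 - k - 1 = (i : Int) - 1 - (k + 1 : Nat) := by push_cast; ring
      have e4 : (i : Int) + 1 + k + 1 = (i : Int) + 1 + (k + 1 : Nat) := by push_cast; ring
      rw [e3, e4, ih (k + 1) (c + 1) (by omega)]
      simp only [run, List.getD_eq_getElem _ _ (show i - 1 - k < s.toList.length by omega),
        List.getD_eq_getElem _ _ hk2, hc, if_true]
      push_cast
      ring
    · have ncond : ¬ (0 ≤ (i : Int) - 1 - k ∧ (i : Int) - 1 - k < i ∧ (i : Int) ≤ (i : Int) + 1 + k ∧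
          (i : Int) + 1 + k < ((s.toList.length : Nat) : Int) ∧
          PySem.Str.pyGet? s ((i : Int) - 1 - k) = PySem.Str.pyGet? s ((i : Int) + 1 + k)) := by
        intro ⟨_, _, _, _, h5⟩
        rw [g1, g2] at h5
        exact hc (Option.some.injEq _ _ ▸ h5)
      rw [dif_neg ncond]
      simp only [run, List.getD_eq_getElem _ _ (show i - 1 - k < s.toList.length by omega),
        List.getD_eq_getElem _ _ hk2, hc, if_false]
      ring

-- B-side: the palindrome test at radius kn holds iff all kn pairs around the center match
theorem palB_iff (s : String) (i kn : Nat) (hk1 : kn ≤ i) (hk2 : i + kn < s.toList.length) :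
    (palB s (i : Int) (kn : Int) = true ↔
      ∀ j, j < kn → s.toList.getD (i - 1 - j) ' ' = s.toList.getD (i + 1 + j) ' ') := by
  have e1 : (i : Int) - kn = ((i - kn : Nat) : Int) := by omega
  have e2 : (i : Int) + kn + 1 = ((i - kn : Nat) : Int) + ((2 * kn + 1 : Nat) : Int) := by
    push_cast; omega
  have hsub : (PySem.Str.slice s (some ((i : Int) - kn)) (some ((i : Int) + kn + 1))).toList
      = (s.toList.drop (i - kn)).take (2 * kn + 1) := by
    rw [e1, e2, PySem.Str.toList_slice, PySem.Chars.slice_eq_listSlice,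
      PySem.List.slice_natCast_add]
  have hofiff : ∀ (x : String) (w : List Char), x = String.ofList w ↔ x.toList = w := by
    intro x w
    constructor
    · intro h; rw [h, String.toList_ofList]
    · intro h; rw [← h, String.ofList_toList]
  have hmain : palB s (i : Int) (kn : Int) = true ↔
      (s.toList.drop (i - kn)).take (2 * kn + 1)
        = ((s.toList.drop (i - kn)).take (2 * kn + 1)).reverse := by
    simp only [palB, PySem.Str.slice?_none_none_neg_one, beq_iff_eq, Option.some.injEq]
    rw [hofiff, hsub]
  rw [hmain]
  have hq : ∀ t, t < 2 * kn + 1 →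
      ((s.toList.drop (i - kn)).take (2 * kn + 1))[t]?
        = some (s.toList.getD (i - kn + t) ' ') := by
    intro t ht
    have hlt : i - kn + t < s.toList.length := by omega
    rw [List.getElem?_take_of_lt ht, List.getElem?_drop]
    rw [List.getElem?_eq_getElem (by omega : i - kn + t < s.toList.length)]
    rw [List.getD_eq_getElem _ _ hlt]
  generalize hl : (s.toList.drop (i - kn)).take (2 * kn + 1) = l at hq
  have hlen : l.length = 2 * kn + 1 := by rw [← hl, List.length_take, List.length_drop]; omega
  constructor
  · intro h j hj
    have hthis := congrArg (fun x : List Char => x[kn - 1 - j]?) h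
    simp only at hthis
    rw [List.getElem?_reverse (by omega), hlen,
      show 2 * kn + 1 - 1 - (kn - 1 - j) = kn + 1 + j by omega,
      hq _ (by omega), hq _ (by omega),
      show i - kn + (kn - 1 - j) = i - 1 - j by omega,
      show i - kn + (kn + 1 + j) = i + 1 + j by omega] at hthis
    exact Option.some.inj hthis
  · intro h
    apply List.ext_getElem?
    intro n
    by_cases hn : n < l.length
    · rw [List.getElem?_reverse hn, hq n (by omega), hq (l.length - 1 - n) (by omega),
          show i - kn + (l.length - 1 - n) = i - kn + (2 * kn - n) by omega]
      rcases Nat.lt_trichotomy n kn with hlt | heq | hgt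
      · rw [show i - kn + n = i - 1 - (kn - 1 - n) by omega,
            show i - kn + (2 * kn - n) = i + 1 + (kn - 1 - n) by omega]
        exact congrArg some (h (kn - 1 - n) (by omega))
      · rw [show i - kn + (2 * kn - n) = i - kn + n by omega]
      · rw [show i - kn + n = i + 1 + (n - kn - 1) by omega,
            show i - kn + (2 * kn - n) = i - 1 - (n - kn - 1) by omega]
        exact congrArg some (h (n - kn - 1) (by omega)).symm
    · rw [List.getElem?_eq_none (by omega), List.getElem?_eq_none (by simp; omega)]

-- B-side: the binary search converges to m when palB characterizes 'radius ≤ m'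
theorem bsLoop_eq (s : String) (index m r : Int)
    (hpal : ∀ k : Int, 0 < k → k ≤ r → (palB s index k = true ↔ k ≤ m)) :
    ∀ (fuel : Nat) (lo hi : Int), 0 ≤ lo → lo ≤ m → m ≤ hi → hi ≤ r →
      (hi - lo).toNat ≤ fuel → bsLoop s index lo hi = m := by
  intro fuel
  induction fuel with
  | zero =>
    intro lo hi h1 h2 h3 h4 h5
    rw [bsLoop, dif_neg (by omega : ¬ lo < hi)]
    omega
  | succ fuel ih =>
    intro lo hi h1 h2 h3 h4 h5
    rw [bsLoop]
    by_cases hlh : lo < hi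
    · rw [dif_pos hlh]
      have hmid := PySem.Int.floordiv_eq_ediv_of_pos (by omega : (0:Int) < 2)
        (a := lo + hi + 1)
      have hb1 : lo < PySem.Int.floordiv (lo + hi + 1) 2 := by rw [hmid]; omega
      have hb2 : PySem.Int.floordiv (lo + hi + 1) 2 ≤ hi := by rw [hmid]; omega
      by_cases hp : palB s index (PySem.Int.floordiv (lo + hi + 1) 2) = true
      · rw [if_pos hp]
        have hle := (hpal _ (by omega) (by omega)).mp hp
        exact ih _ hi (by omega) hle h3 h4 (by rw [hmid] at *; omega)
      · rw [if_neg hp]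
        have hgt : ¬ (PySem.Int.floordiv (lo + hi + 1) 2 ≤ m) := fun hc =>
          hp ((hpal _ (by omega) (by omega)).mpr hc)
        exact ih lo _ h1 h2 (by omega) (by omega) (by rw [hmid] at *; omega)
    · rw [dif_neg hlh]
      omega

-- ===== VERDICT (by name: the statement is the Claim_ definition above) =====
theorem count_odd_palindromes_spec : Claim_equal_count_odd_palindromes := by
  intro s index _
  unfold Spec_count_odd_palindromes count_odd_palindromes count_odd_palindromes_alt
  have hLen : PySem.Str.len s = ((s.toList.length : Nat) : Int) := by
    simp [PySem.Str.len]
  rw [hLen]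
  simp only [zero_add]
  by_cases hin : 0 ≤ index ∧ index < ((s.toList.length : Nat) : Int)
  · -- valid center
    obtain ⟨h0, h1⟩ := hin
    obtain ⟨i, rfl⟩ : ∃ i : Nat, index = (i : Int) := ⟨index.toNat, (Int.toNat_of_nonneg h0).symm⟩
    have hi : i < s.toList.length := by omega
    set rn : Nat := min i (s.toList.length - 1 - i) with hrn
    have hr : min (i : Int) (((s.toList.length : Nat) : Int) - i - 1) = (rn : Int) := by omega
    have hpos : ¬ ((rn : Int) < 0) := by omega
    rw [hr, if_neg hpos]
    set m : Nat := run s.toList i 0 rn with hm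
    have hmr : m ≤ rn := run_le s.toList i rn 0
    have hbs : bsLoop s (i : Int) 0 (rn : Int) = (m : Int) := by
      apply bsLoop_eq s (i : Int) (m : Int) (rn : Int) ?_
        (rn : Nat) 0 (rn : Int) (by omega) (by omega) (by omega) (by omega) (by omega)
      intro k hk0 hkr
      obtain ⟨kn, rfl⟩ : ∃ kn : Nat, k = (kn : Int) := ⟨k.toNat, (Int.toNat_of_nonneg (by omega)).symm⟩
      rw [palB_iff s i kn (by omega) (by omega)]
      have := run_iff s.toList i rn 0 kn (by omega)
      simp only [Nat.zero_add] at this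
      rw [this, ← hm]
      omega
    rw [hbs]
    have key := loopA_eq_run s i 0 rn 1 (by omega) hi
    push_cast at key
    simp only [sub_zero, add_zero] at key
    rw [key]
  · -- degenerate: index out of [0, len): both sides return 1
    rw [countA_loop]
    have ncond : ¬ (0 ≤ index - 1 ∧ index - 1 < index ∧ index ≤ index + 1 ∧
        index + 1 < ((s.toList.length : Nat) : Int) ∧
        PySem.Str.pyGet? s (index - 1) = PySem.Str.pyGet? s (index + 1)) := by
      intro ⟨c1, _, _, c4, _⟩
      omega
    rw [dif_neg ncond]
    have hneg : min index (((s.toList.length : Nat) : Int) - index - 1) < 0 := by omega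
    rw [if_pos hneg]
    rw [bsLoop, dif_neg (by omega : ¬ (0:Int) < 0)]
    omega
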